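-- pv_equiv track=rewrite | github.com/delosyCho/Retrieving-Knowledge-in-Tabular-Form-from-Free-form-Natural-Language | data_preprocess/HTML_Utils.py | answer_re_touch
-- ===== SOURCE A (Python) =====
-- tag_list = ['<h>', '</h>', '<p>', '</p>']
--
-- tag2replace = [' [h]', ' [/h]', ' [p]', ' [/p]']
--
-- def answer_re_touch(document):
--     tags = ['[list]', '[/list]', '[li]', '[/li]']
--     tags2 = ['<list>', '</list>', '<li>', '</li>']
--
--     for i in range(len(tag_list)):
--         document = document.replace(tag2replace[i], tag_list[i])
--     for i in range(len(tags)):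
--         document = document.replace(tags[i], tags2[i])
--
--     return document
-- ===== SOURCE B (Python) =====
-- TAG_MAP = [(' [h]', '<h>'), (' [/h]', '</h>'), (' [p]', '<p>'), (' [/p]', '</p>'),
--            ('[list]', '<list>'), ('[/list]', '</list>'), ('[li]', '<li>'), ('[/li]', '</li>')]
--
-- def answer_re_touch(document):
--     # single left-to-right pass: at each position try the eight tags, copy tag
--     # replacement or the current character, never rescanning emitted text
--     out = []
--     i = 0
--     n = len(document)
--     while i < n:
--         for tag, rep in TAG_MAP:
--             if document.startswith(tag, i):
--                 out.append(rep)
--                 i += len(tag)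
--                 break
--         else:
--             out.append(document[i])
--             i += 1
--     return ''.join(out)
-- ===== Notes on version B (the rewrite author's own statement) =====
-- stated objective: alternative
-- what changed: Replaces A's eight sequential full-string str.replace passes by a single left-to-right scan that tries the eight tags at each position against a fixed tag table and never rescans emitted text.
import Mathlib
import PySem

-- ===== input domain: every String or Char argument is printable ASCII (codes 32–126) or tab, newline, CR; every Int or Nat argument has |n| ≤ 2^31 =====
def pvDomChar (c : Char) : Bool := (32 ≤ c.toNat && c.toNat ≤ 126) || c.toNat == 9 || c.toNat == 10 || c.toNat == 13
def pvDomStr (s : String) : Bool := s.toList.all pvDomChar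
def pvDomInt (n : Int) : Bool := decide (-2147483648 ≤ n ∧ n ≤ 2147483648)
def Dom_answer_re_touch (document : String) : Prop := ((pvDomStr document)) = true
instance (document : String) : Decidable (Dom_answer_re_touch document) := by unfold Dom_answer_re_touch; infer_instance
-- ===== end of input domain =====

-- B replaces A's eight sequential full-string str.replace passes by one left-to-right
-- scan with a fixed tag table (objective: alternative single-pass algorithm).

-- ===== PORT A =====
def answer_re_touch (document : String) : String :=
  let tag_list : List String := ["<h>", "</h>", "<p>", "</p>"]
  let tag2replace : List String := [" [h]", " [/h]", " [p]", " [/p]"]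
  let tags : List String := ["[list]", "[/list]", "[li]", "[/li]"]
  let tags2 : List String := ["<list>", "</list>", "<li>", "</li>"]
  let d1 := (PySem.List.pyRange 0 (tag_list.length : Int) 1).foldl
    (fun d i => PySem.Str.replace d (PySem.List.pyGetD tag2replace i "") (PySem.List.pyGetD tag_list i "")) document
  (PySem.List.pyRange 0 (tags.length : Int) 1).foldl
    (fun d i => PySem.Str.replace d (PySem.List.pyGetD tags i "") (PySem.List.pyGetD tags2 i "")) d1

-- ===== PORT B =====
-- Source B's loop over TAG_MAP unrolled into the first-match chain of the eight fixed tags;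
-- a matched tag advances by its length (the head char plus tag.length - 1 from the tail),
-- an unmatched position copies one character; emitted text is never rescanned.
def scanTags : List Char → List Char
  | [] => []
  | c :: t =>
    if List.isPrefixOf [' ', '[', 'h', ']'] (c :: t) then ['<', 'h', '>'] ++ scanTags (t.drop 3)
    else if List.isPrefixOf [' ', '[', '/', 'h', ']'] (c :: t) then ['<', '/', 'h', '>'] ++ scanTags (t.drop 4)
    else if List.isPrefixOf [' ', '[', 'p', ']'] (c :: t) then ['<', 'p', '>'] ++ scanTags (t.drop 3)
    else if List.isPrefixOf [' ', '[', '/', 'p', ']'] (c :: t) then ['<', '/', 'p', '>'] ++ scanTags (t.drop 4)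
    else if List.isPrefixOf ['[', 'l', 'i', 's', 't', ']'] (c :: t) then ['<', 'l', 'i', 's', 't', '>'] ++ scanTags (t.drop 5)
    else if List.isPrefixOf ['[', '/', 'l', 'i', 's', 't', ']'] (c :: t) then ['<', '/', 'l', 'i', 's', 't', '>'] ++ scanTags (t.drop 6)
    else if List.isPrefixOf ['[', 'l', 'i', ']'] (c :: t) then ['<', 'l', 'i', '>'] ++ scanTags (t.drop 3)
    else if List.isPrefixOf ['[', '/', 'l', 'i', ']'] (c :: t) then ['<', '/', 'l', 'i', '>'] ++ scanTags (t.drop 4)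
    else c :: scanTags t
termination_by l => l.length
decreasing_by all_goals (simp; try omega)

def answer_re_touch_alt (document : String) : String :=
  String.ofList (scanTags document.toList)

-- ===== PRECONDITION & SPEC =====
def Spec_answer_re_touch (document : String) (out : String) : Prop := out = answer_re_touch_alt document
instance (document : String) (out : String) : Decidable (Spec_answer_re_touch document out) := by unfold Spec_answer_re_touch; infer_instance

-- ===== CLAIM (what is proved, stated in full; the proofs are below) =====
def Claim_equal_answer_re_touch : Prop := ∀ (document : String), Dom_answer_re_touch document → Spec_answer_re_touch document (answer_re_touch document)

-- ===== LEMMAS AND PROOFS =====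

-- one sequential-replace pass (Python str.replace, left to right, non-overlapping)
def rep1 (p n : List Char) : List Char → List Char
  | [] => []
  | c :: t =>
    if List.isPrefixOf p (c :: t) then n ++ rep1 p n (t.drop (p.length - 1))
    else c :: rep1 p n t
termination_by l => l.length
decreasing_by all_goals (simp; try omega)

lemma rep1_nil (p n : List Char) : rep1 p n [] = [] := by rw [rep1]

lemma rep1_cons_neg (p n : List Char) (c : Char) (t : List Char)
    (h : ¬ p <+: (c :: t)) : rep1 p n (c :: t) = c :: rep1 p n t := by
  rw [rep1, if_neg (fun hb => h (List.isPrefixOf_iff_prefix.mp hb))]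

lemma rep1_cons_pos (p n : List Char) (c : Char) (t : List Char)
    (h : p <+: (c :: t)) :
    rep1 p n (c :: t) = n ++ rep1 p n (t.drop (p.length - 1)) := by
  rw [rep1, if_pos (List.isPrefixOf_iff_prefix.mpr h)]

-- PySem.Chars.replace equals rep1 for a nonempty pattern
lemma replace_go_eq (old new : List Char) (hold : old ≠ []) :
    ∀ (fuel : Nat) (l acc : List Char), l.length ≤ fuel →
      PySem.Chars.replace.go old new fuel l acc = acc.reverse ++ rep1 old new l := by
  intro fuel
  induction fuel with
  | zero =>
    intro l acc hl
    have hln : l = [] := by cases l <;> simp_all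
    subst hln
    rw [rep1_nil]
    simp [PySem.Chars.replace.go.eq_def]
  | succ f ih =>
    intro l acc hl
    cases l with
    | nil => rw [rep1_nil]; simp [PySem.Chars.replace.go.eq_def]
    | cons c t =>
      show (if List.isPrefixOf old (c :: t) = true then
              PySem.Chars.replace.go old new f (List.drop old.length (c :: t)) (new.reverse ++ acc)
            else PySem.Chars.replace.go old new f t (c :: acc))
          = acc.reverse ++ rep1 old new (c :: t)
      by_cases h : old <+: (c :: t)
      · rw [if_pos (List.isPrefixOf_iff_prefix.mpr h), rep1_cons_pos old new c t h]
        cases old with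
        | nil => exact absurd rfl hold
        | cons o os =>
          have hdrop : List.drop (o :: os).length (c :: t) = t.drop ((o :: os).length - 1) := by
            simp
          rw [hdrop, ih _ _ (by simp at hl ⊢; omega)]
          simp
      · rw [if_neg (fun hb => h (List.isPrefixOf_iff_prefix.mp hb)),
            rep1_cons_neg old new c t h, ih _ _ (by simp at hl; omega)]
        simp

lemma replace_eq (s old new : List Char) (hold : old ≠ []) :
    PySem.Chars.replace s old new = rep1 old new s := by
  unfold PySem.Chars.replace
  rw [if_neg (by simp [List.isEmpty_iff, hold])]
  simpa using replace_go_eq old new hold s.length s [] le_rfl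

-- "p mismatches inside L at every start position": no occurrence of p can begin inside L
abbrev mmOK (p L : List Char) : Prop :=
  ∀ i < L.length, ∃ j < p.length, i + j < L.length ∧ p.getD j ' ' ≠ L.getD (i + j) ' '

lemma rep1_passes (p n : List Char) :
    ∀ (L : List Char), mmOK p L → ∀ Z, rep1 p n (L ++ Z) = L ++ rep1 p n Z := by
  intro L
  induction L with
  | nil => intro _ Z; simp
  | cons c L' ih =>
    intro h Z
    have hpref : ¬ p <+: c :: (L' ++ Z) := by
      intro hp
      obtain ⟨j, hj, hij, hne⟩ := h 0 (by simp)
      simp only [Nat.zero_add] at hij hne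
      apply hne
      obtain ⟨r, hr⟩ := hp
      have h1 : (c :: (L' ++ Z)).getD j ' ' = (c :: L').getD j ' ' :=
        List.getD_append (c :: L') Z ' ' j hij
      have h2 : (p ++ r).getD j ' ' = p.getD j ' ' :=
        List.getD_append _ _ _ _ hj
      rw [← h1, ← hr, h2]
    have hL' : mmOK p L' := by
      intro i hi
      obtain ⟨j, hj, hij, hne⟩ := h (i + 1) (by simp; omega)
      refine ⟨j, hj, by simp at hij ⊢; omega, ?_⟩
      have he : (c :: L').getD (i + 1 + j) ' ' = L'.getD (i + j) ' ' := by
        have hix : i + 1 + j = (i + j) + 1 := by omega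
        rw [hix, List.getD_cons_succ]
      rw [← he]; exact hne
    show rep1 p n (c :: (L' ++ Z)) = c :: (L' ++ rep1 p n Z)
    rw [rep1_cons_neg _ _ _ _ hpref, ih hL' Z]

lemma rep1_match (p n : List Char) (hp : p ≠ []) :
    ∀ z, rep1 p n (p ++ z) = n ++ rep1 p n z := by
  intro z
  cases p with
  | nil => exact absurd rfl hp
  | cons a p' =>
    have hpref : (a :: p') <+: a :: (p' ++ z) := ⟨z, rfl⟩
    show rep1 (a :: p') n (a :: (p' ++ z)) = n ++ rep1 (a :: p') n z
    rw [rep1_cons_pos _ _ _ _ hpref]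
    congr 2
    simp

-- occurrences never appear: a pattern (no '<', nonempty) that is a prefix of the output of a
-- replacement pass whose inserted text starts with '<' was already a prefix of that pass's input
lemma pref_back (q m : List Char) :
    ∀ (X p : List Char), p ≠ [] → '<' ∉ p → p <+: rep1 q ('<' :: m) X → p <+: X := by
  intro X
  induction X with
  | nil =>
    intro p hp _ hpre
    rw [rep1_nil] at hpre
    simp only [List.prefix_nil] at hpre
    exact absurd hpre hp
  | cons c t ih =>
    intro p hp hlt hpre
    by_cases hq : q <+: (c :: t)
    · rw [rep1_cons_pos _ _ _ _ hq] at hpre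
      cases p with
      | nil => exact absurd rfl hp
      | cons a p' =>
        rw [List.cons_append, List.cons_prefix_cons] at hpre
        exact absurd (hpre.1 ▸ List.mem_cons_self) hlt
    · rw [rep1_cons_neg _ _ _ _ hq] at hpre
      cases p with
      | nil => exact absurd rfl hp
      | cons a p' =>
        rw [List.cons_prefix_cons] at hpre ⊢
        refine ⟨hpre.1, ?_⟩
        cases p' with
        | nil => exact List.nil_prefix
        | cons b p'' =>
          exact ih _ (by simp) (fun hmem => hlt (List.mem_cons_of_mem _ hmem)) hpre.2

-- A's eight passes, in A's order, as one fold
def pvChains : List (List Char × List Char) :=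
  [([' ', '[', 'h', ']'], ['<', 'h', '>']),
   ([' ', '[', '/', 'h', ']'], ['<', '/', 'h', '>']),
   ([' ', '[', 'p', ']'], ['<', 'p', '>']),
   ([' ', '[', '/', 'p', ']'], ['<', '/', 'p', '>']),
   (['[', 'l', 'i', 's', 't', ']'], ['<', 'l', 'i', 's', 't', '>']),
   (['[', '/', 'l', 'i', 's', 't', ']'], ['<', '/', 'l', 'i', 's', 't', '>']),
   (['[', 'l', 'i', ']'], ['<', 'l', 'i', '>']),
   (['[', '/', 'l', 'i', ']'], ['<', '/', 'l', 'i', '>'])]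

def chainA (l : List Char) : List Char :=
  pvChains.foldl (fun acc pr => rep1 pr.1 pr.2 acc) l

lemma chainA_nil : chainA [] = [] := by
  simp [chainA, pvChains, rep1_nil]

lemma foldl_passes (ps : List (List Char × List Char)) (L : List Char)
    (h : ∀ pr ∈ ps, mmOK pr.1 L) :
    ∀ Z, ps.foldl (fun acc pr => rep1 pr.1 pr.2 acc) (L ++ Z)
        = L ++ ps.foldl (fun acc pr => rep1 pr.1 pr.2 acc) Z := by
  induction ps generalizing L with
  | nil => intro Z; simp
  | cons pr ps' ih =>
    intro Z
    simp only [List.foldl_cons]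
    rw [rep1_passes pr.1 pr.2 L (h pr (by simp)) Z]
    exact ih L (fun q hq => h q (by simp [hq])) _

-- a position where no tag matches is copied through all eight passes
lemma chain_cons (c : Char) (t : List Char)
    (h : ∀ pr ∈ pvChains, ¬ pr.1 <+: (c :: t)) :
    chainA (c :: t) = c :: chainA t := by
  unfold chainA
  suffices H : ∀ (ps : List (List Char × List Char)) (t : List Char),
      (∀ pr ∈ ps, pr.1 ≠ [] ∧ '<' ∉ pr.1 ∧ pr.2 = '<' :: pr.2.tail) →
      (∀ pr ∈ ps, ¬ pr.1 <+: (c :: t)) →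
      ps.foldl (fun acc pr => rep1 pr.1 pr.2 acc) (c :: t)
        = c :: ps.foldl (fun acc pr => rep1 pr.1 pr.2 acc) t by
    exact H pvChains t (by decide) h
  intro ps
  induction ps with
  | nil => intro t _ _; simp
  | cons pr ps' ih =>
    intro t hsh hnp
    simp only [List.foldl_cons]
    rw [rep1_cons_neg _ _ _ _ (hnp pr (by simp))]
    apply ih
    · exact fun q hq => hsh q (by simp [hq])
    · intro q hq hqp
      obtain ⟨hne, hlt, hm⟩ := hsh pr (by simp)
      apply hnp q (by simp [hq])
      have hpc : q.1 <+: rep1 pr.1 pr.2 (c :: t) := by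
        rw [rep1_cons_neg _ _ _ _ (hnp pr (by simp))]; exact hqp
      rw [hm] at hpc
      exact pref_back pr.1 pr.2.tail (c :: t) q.1 (hsh q (by simp [hq])).1 (hsh q (by simp [hq])).2.1 hpc

-- a matched tag is untouched by the earlier passes, replaced by its own pass, and the
-- replacement is untouched by the later passes
lemma stepA_gen (pre post : List (List Char × List Char)) (p n : List Char)
    (hsplit : pvChains = pre ++ (p, n) :: post) (hp : p ≠ [])
    (hpre : ∀ pr ∈ pre, mmOK pr.1 p) (hpost : ∀ pr ∈ post, mmOK pr.1 n) (z : List Char) :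
    chainA (p ++ z) = n ++ chainA z := by
  unfold chainA
  rw [hsplit]
  rw [List.foldl_append, List.foldl_append, List.foldl_cons, List.foldl_cons]
  rw [foldl_passes pre p hpre z, rep1_match p n hp, foldl_passes post n hpost]

lemma scanTags_nil : scanTags [] = [] := by rw [scanTags]

lemma scanTags_cons_neg (c : Char) (t : List Char)
    (h : ∀ pr ∈ pvChains, ¬ pr.1 <+: (c :: t)) :
    scanTags (c :: t) = c :: scanTags t := by
  have h1 := h _ (show ([' ', '[', 'h', ']'], ['<', 'h', '>']) ∈ pvChains by decide)
  have h2 := h _ (show ([' ', '[', '/', 'h', ']'], ['<', '/', 'h', '>']) ∈ pvChains by decide)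
  have h3 := h _ (show ([' ', '[', 'p', ']'], ['<', 'p', '>']) ∈ pvChains by decide)
  have h4 := h _ (show ([' ', '[', '/', 'p', ']'], ['<', '/', 'p', '>']) ∈ pvChains by decide)
  have h5 := h _ (show (['[', 'l', 'i', 's', 't', ']'], ['<', 'l', 'i', 's', 't', '>']) ∈ pvChains by decide)
  have h6 := h _ (show (['[', '/', 'l', 'i', 's', 't', ']'], ['<', '/', 'l', 'i', 's', 't', '>']) ∈ pvChains by decide)
  have h7 := h _ (show (['[', 'l', 'i', ']'], ['<', 'l', 'i', '>']) ∈ pvChains by decide)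
  have h8 := h _ (show (['[', '/', 'l', 'i', ']'], ['<', '/', 'l', 'i', '>']) ∈ pvChains by decide)
  rw [scanTags,
    if_neg (fun hb => h1 (List.isPrefixOf_iff_prefix.mp hb)),
    if_neg (fun hb => h2 (List.isPrefixOf_iff_prefix.mp hb)),
    if_neg (fun hb => h3 (List.isPrefixOf_iff_prefix.mp hb)),
    if_neg (fun hb => h4 (List.isPrefixOf_iff_prefix.mp hb)),
    if_neg (fun hb => h5 (List.isPrefixOf_iff_prefix.mp hb)),
    if_neg (fun hb => h6 (List.isPrefixOf_iff_prefix.mp hb)),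
    if_neg (fun hb => h7 (List.isPrefixOf_iff_prefix.mp hb)),
    if_neg (fun hb => h8 (List.isPrefixOf_iff_prefix.mp hb))]

-- the main bridge: A's composed passes equal B's single scan
lemma chainA_eq_scan : ∀ (N : Nat) (l : List Char), l.length ≤ N → chainA l = scanTags l := by
  intro N
  induction N with
  | zero =>
    intro l hl
    have hln : l = [] := by cases l <;> simp_all
    subst hln
    rw [scanTags_nil, chainA_nil]
  | succ N ih =>
    intro l hl
    cases l with
    | nil => rw [scanTags_nil, chainA_nil]
    | cons c t =>
      by_cases h1 : ([' ', '[', 'h', ']'] : List Char) <+: (c :: t)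
      · obtain ⟨z, hz⟩ := h1
        have hlen : z.length ≤ N := by
          have := congrArg List.length hz; simp at this hl; omega
        rw [← hz, stepA_gen [] [([' ', '[', '/', 'h', ']'], ['<', '/', 'h', '>']), ([' ', '[', 'p', ']'], ['<', 'p', '>']), ([' ', '[', '/', 'p', ']'], ['<', '/', 'p', '>']), (['[', 'l', 'i', 's', 't', ']'], ['<', 'l', 'i', 's', 't', '>']), (['[', '/', 'l', 'i', 's', 't', ']'], ['<', '/', 'l', 'i', 's', 't', '>']), (['[', 'l', 'i', ']'], ['<', 'l', 'i', '>']), (['[', '/', 'l', 'i', ']'], ['<', '/', 'l', 'i', '>'])] [' ', '[', 'h', ']'] ['<', 'h', '>'] rfl (by decide) (by decide) (by decide) z,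
            show ([' ', '[', 'h', ']'] : List Char) ++ z = ' ' :: '[' :: 'h' :: ']' :: z from rfl, scanTags]
        simp [List.isPrefixOf, ih z hlen]
      by_cases h2 : ([' ', '[', '/', 'h', ']'] : List Char) <+: (c :: t)
      · obtain ⟨z, hz⟩ := h2
        have hlen : z.length ≤ N := by
          have := congrArg List.length hz; simp at this hl; omega
        rw [← hz, stepA_gen [([' ', '[', 'h', ']'], ['<', 'h', '>'])] [([' ', '[', 'p', ']'], ['<', 'p', '>']), ([' ', '[', '/', 'p', ']'], ['<', '/', 'p', '>']), (['[', 'l', 'i', 's', 't', ']'], ['<', 'l', 'i', 's', 't', '>']), (['[', '/', 'l', 'i', 's', 't', ']'], ['<', '/', 'l', 'i', 's', 't', '>']), (['[', 'l', 'i', ']'], ['<', 'l', 'i', '>']), (['[', '/', 'l', 'i', ']'], ['<', '/', 'l', 'i', '>'])] [' ', '[', '/', 'h', ']'] ['<', '/', 'h', '>'] rfl (by decide) (by decide) (by decide) z,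
            show ([' ', '[', '/', 'h', ']'] : List Char) ++ z = ' ' :: '[' :: '/' :: 'h' :: ']' :: z from rfl, scanTags]
        simp [List.isPrefixOf, ih z hlen]
      by_cases h3 : ([' ', '[', 'p', ']'] : List Char) <+: (c :: t)
      · obtain ⟨z, hz⟩ := h3
        have hlen : z.length ≤ N := by
          have := congrArg List.length hz; simp at this hl; omega
        rw [← hz, stepA_gen [([' ', '[', 'h', ']'], ['<', 'h', '>']), ([' ', '[', '/', 'h', ']'], ['<', '/', 'h', '>'])] [([' ', '[', '/', 'p', ']'], ['<', '/', 'p', '>']), (['[', 'l', 'i', 's', 't', ']'], ['<', 'l', 'i', 's', 't', '>']), (['[', '/', 'l', 'i', 's', 't', ']'], ['<', '/', 'l', 'i', 's', 't', '>']), (['[', 'l', 'i', ']'], ['<', 'l', 'i', '>']), (['[', '/', 'l', 'i', ']'], ['<', '/', 'l', 'i', '>'])] [' ', '[', 'p', ']'] ['<', 'p', '>'] rfl (by decide) (by decide) (by decide) z,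
            show ([' ', '[', 'p', ']'] : List Char) ++ z = ' ' :: '[' :: 'p' :: ']' :: z from rfl, scanTags]
        simp [List.isPrefixOf, ih z hlen]
      by_cases h4 : ([' ', '[', '/', 'p', ']'] : List Char) <+: (c :: t)
      · obtain ⟨z, hz⟩ := h4
        have hlen : z.length ≤ N := by
          have := congrArg List.length hz; simp at this hl; omega
        rw [← hz, stepA_gen [([' ', '[', 'h', ']'], ['<', 'h', '>']), ([' ', '[', '/', 'h', ']'], ['<', '/', 'h', '>']), ([' ', '[', 'p', ']'], ['<', 'p', '>'])] [(['[', 'l', 'i', 's', 't', ']'], ['<', 'l', 'i', 's', 't', '>']), (['[', '/', 'l', 'i', 's', 't', ']'], ['<', '/', 'l', 'i', 's', 't', '>']), (['[', 'l', 'i', ']'], ['<', 'l', 'i', '>']), (['[', '/', 'l', 'i', ']'], ['<', '/', 'l', 'i', '>'])] [' ', '[', '/', 'p', ']'] ['<', '/', 'p', '>'] rfl (by decide) (by decide) (by decide) z,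
            show ([' ', '[', '/', 'p', ']'] : List Char) ++ z = ' ' :: '[' :: '/' :: 'p' :: ']' :: z from rfl, scanTags]
        simp [List.isPrefixOf, ih z hlen]
      by_cases h5 : (['[', 'l', 'i', 's', 't', ']'] : List Char) <+: (c :: t)
      · obtain ⟨z, hz⟩ := h5
        have hlen : z.length ≤ N := by
          have := congrArg List.length hz; simp at this hl; omega
        rw [← hz, stepA_gen [([' ', '[', 'h', ']'], ['<', 'h', '>']), ([' ', '[', '/', 'h', ']'], ['<', '/', 'h', '>']), ([' ', '[', 'p', ']'], ['<', 'p', '>']), ([' ', '[', '/', 'p', ']'], ['<', '/', 'p', '>'])] [(['[', '/', 'l', 'i', 's', 't', ']'], ['<', '/', 'l', 'i', 's', 't', '>']), (['[', 'l', 'i', ']'], ['<', 'l', 'i', '>']), (['[', '/', 'l', 'i', ']'], ['<', '/', 'l', 'i', '>'])] ['[', 'l', 'i', 's', 't', ']'] ['<', 'l', 'i', 's', 't', '>'] rfl (by decide) (by decide) (by decide) z,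
            show (['[', 'l', 'i', 's', 't', ']'] : List Char) ++ z = '[' :: 'l' :: 'i' :: 's' :: 't' :: ']' :: z from rfl, scanTags]
        simp [List.isPrefixOf, ih z hlen]
      by_cases h6 : (['[', '/', 'l', 'i', 's', 't', ']'] : List Char) <+: (c :: t)
      · obtain ⟨z, hz⟩ := h6
        have hlen : z.length ≤ N := by
          have := congrArg List.length hz; simp at this hl; omega
        rw [← hz, stepA_gen [([' ', '[', 'h', ']'], ['<', 'h', '>']), ([' ', '[', '/', 'h', ']'], ['<', '/', 'h', '>']), ([' ', '[', 'p', ']'], ['<', 'p', '>']), ([' ', '[', '/', 'p', ']'], ['<', '/', 'p', '>']), (['[', 'l', 'i', 's', 't', ']'], ['<', 'l', 'i', 's', 't', '>'])] [(['[', 'l', 'i', ']'], ['<', 'l', 'i', '>']), (['[', '/', 'l', 'i', ']'], ['<', '/', 'l', 'i', '>'])] ['[', '/', 'l', 'i', 's', 't', ']'] ['<', '/', 'l', 'i', 's', 't', '>'] rfl (by decide) (by decide) (by decide) z,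
            show (['[', '/', 'l', 'i', 's', 't', ']'] : List Char) ++ z = '[' :: '/' :: 'l' :: 'i' :: 's' :: 't' :: ']' :: z from rfl, scanTags]
        simp [List.isPrefixOf, ih z hlen]
      by_cases h7 : (['[', 'l', 'i', ']'] : List Char) <+: (c :: t)
      · obtain ⟨z, hz⟩ := h7
        have hlen : z.length ≤ N := by
          have := congrArg List.length hz; simp at this hl; omega
        rw [← hz, stepA_gen [([' ', '[', 'h', ']'], ['<', 'h', '>']), ([' ', '[', '/', 'h', ']'], ['<', '/', 'h', '>']), ([' ', '[', 'p', ']'], ['<', 'p', '>']), ([' ', '[', '/', 'p', ']'], ['<', '/', 'p', '>']), (['[', 'l', 'i', 's', 't', ']'], ['<', 'l', 'i', 's', 't', '>']), (['[', '/', 'l', 'i', 's', 't', ']'], ['<', '/', 'l', 'i', 's', 't', '>'])] [(['[', '/', 'l', 'i', ']'], ['<', '/', 'l', 'i', '>'])] ['[', 'l', 'i', ']'] ['<', 'l', 'i', '>'] rfl (by decide) (by decide) (by decide) z,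
            show (['[', 'l', 'i', ']'] : List Char) ++ z = '[' :: 'l' :: 'i' :: ']' :: z from rfl, scanTags]
        simp [List.isPrefixOf, ih z hlen]
      by_cases h8 : (['[', '/', 'l', 'i', ']'] : List Char) <+: (c :: t)
      · obtain ⟨z, hz⟩ := h8
        have hlen : z.length ≤ N := by
          have := congrArg List.length hz; simp at this hl; omega
        rw [← hz, stepA_gen [([' ', '[', 'h', ']'], ['<', 'h', '>']), ([' ', '[', '/', 'h', ']'], ['<', '/', 'h', '>']), ([' ', '[', 'p', ']'], ['<', 'p', '>']), ([' ', '[', '/', 'p', ']'], ['<', '/', 'p', '>']), (['[', 'l', 'i', 's', 't', ']'], ['<', 'l', 'i', 's', 't', '>']), (['[', '/', 'l', 'i', 's', 't', ']'], ['<', '/', 'l', 'i', 's', 't', '>']), (['[', 'l', 'i', ']'], ['<', 'l', 'i', '>'])] [] ['[', '/', 'l', 'i', ']'] ['<', '/', 'l', 'i', '>'] rfl (by decide) (by decide) (by decide) z,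
            show (['[', '/', 'l', 'i', ']'] : List Char) ++ z = '[' :: '/' :: 'l' :: 'i' :: ']' :: z from rfl, scanTags]
        simp [List.isPrefixOf, ih z hlen]
      have hall : ∀ pr ∈ pvChains, ¬ pr.1 <+: (c :: t) := by
        intro pr hpr
        simp only [pvChains, List.mem_cons, List.not_mem_nil, or_false] at hpr
        rcases hpr with rfl | rfl | rfl | rfl | rfl | rfl | rfl | rfl <;> assumption
      rw [chain_cons c t hall, scanTags_cons_neg c t hall, ih t (by simp at hl; omega)]

lemma strrep_eq (s o n : String) (h : o.toList ≠ []) :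
    PySem.Str.replace s o n = String.ofList (rep1 o.toList n.toList s.toList) := by
  unfold PySem.Str.replace
  rw [replace_eq _ _ _ h]

-- bridge from port A to chainA
lemma portA_eq (document : String) :
    answer_re_touch document = String.ofList (chainA document.toList) := by
  show PySem.Str.replace (PySem.Str.replace (PySem.Str.replace (PySem.Str.replace (PySem.Str.replace (PySem.Str.replace (PySem.Str.replace (PySem.Str.replace (document) " [h]" "<h>") " [/h]" "</h>") " [p]" "<p>") " [/p]" "</p>") "[list]" "<list>") "[/list]" "</list>") "[li]" "<li>") "[/li]" "</li>" = String.ofList (chainA document.toList)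
  rw [strrep_eq _ _ _ (by decide), strrep_eq _ _ _ (by decide), strrep_eq _ _ _ (by decide),
      strrep_eq _ _ _ (by decide), strrep_eq _ _ _ (by decide), strrep_eq _ _ _ (by decide),
      strrep_eq _ _ _ (by decide), strrep_eq _ _ _ (by decide)]
  simp only [String.toList_ofList,
    show (" [h]".toList) = [' ', '[', 'h', ']'] from by decide,
    show ("<h>".toList) = ['<', 'h', '>'] from by decide,
    show (" [/h]".toList) = [' ', '[', '/', 'h', ']'] from by decide,
    show ("</h>".toList) = ['<', '/', 'h', '>'] from by decide,
    show (" [p]".toList) = [' ', '[', 'p', ']'] from by decide,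
    show ("<p>".toList) = ['<', 'p', '>'] from by decide,
    show (" [/p]".toList) = [' ', '[', '/', 'p', ']'] from by decide,
    show ("</p>".toList) = ['<', '/', 'p', '>'] from by decide,
    show ("[list]".toList) = ['[', 'l', 'i', 's', 't', ']'] from by decide,
    show ("<list>".toList) = ['<', 'l', 'i', 's', 't', '>'] from by decide,
    show ("[/list]".toList) = ['[', '/', 'l', 'i', 's', 't', ']'] from by decide,
    show ("</list>".toList) = ['<', '/', 'l', 'i', 's', 't', '>'] from by decide,
    show ("[li]".toList) = ['[', 'l', 'i', ']'] from by decide,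
    show ("<li>".toList) = ['<', 'l', 'i', '>'] from by decide,
    show ("[/li]".toList) = ['[', '/', 'l', 'i', ']'] from by decide,
    show ("</li>".toList) = ['<', '/', 'l', 'i', '>'] from by decide]
  simp only [chainA, pvChains, List.foldl_cons, List.foldl_nil]

-- ===== VERDICT (by name: the statement is the Claim_ definition above) =====
theorem answer_re_touch_spec : Claim_equal_answer_re_touch := by
  intro d _
  unfold Spec_answer_re_touch answer_re_touch_alt
  rw [portA_eq, chainA_eq_scan d.toList.length d.toList le_rfl]
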